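-- pv_equiv track=rewrite | github.com/parhamgh2020/kattis | This Ain't Your Grandpa's Checkerboard.py | check
-- ===== SOURCE A (Python) =====
-- def check(lst):
--     for r in lst:
--         if r.count('W') != r.count('B'):
--             return False
--         w, b = 0, 0
--         for c in r:
--             if c == 'W':
--                 w += 1
--                 b = 0
--             else:
--                 b += 1
--                 w = 0
--             if w > 2 or b > 2:
--                 return False
--     return True
-- ===== SOURCE B (Python) =====
-- def _run_lengths(r):
--     # lengths of maximal runs of same-color cells (key: is the cell 'W'?)
--     if not r:
--         return []
--     lens = []
--     key, n = r[0] == 'W', 1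
--     for c in r[1:]:
--         k = c == 'W'
--         if k == key:
--             n += 1
--         else:
--             lens.append(n)
--             key, n = k, 1
--     lens.append(n)
--     return lens
--
--
-- def check(lst):
--     return all(
--         r.count('W') == r.count('B') and all(n <= 2 for n in _run_lengths(r))
--         for r in lst
--     )
-- ===== Notes on version B (the rewrite author's own statement) =====
-- stated objective: idiomatic
-- what changed: B replaces A's per-character w/b run counters with early exit by computing each row's maximal-run lengths (groupby-style) and checking all runs have length <= 2.
import Mathlib
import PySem

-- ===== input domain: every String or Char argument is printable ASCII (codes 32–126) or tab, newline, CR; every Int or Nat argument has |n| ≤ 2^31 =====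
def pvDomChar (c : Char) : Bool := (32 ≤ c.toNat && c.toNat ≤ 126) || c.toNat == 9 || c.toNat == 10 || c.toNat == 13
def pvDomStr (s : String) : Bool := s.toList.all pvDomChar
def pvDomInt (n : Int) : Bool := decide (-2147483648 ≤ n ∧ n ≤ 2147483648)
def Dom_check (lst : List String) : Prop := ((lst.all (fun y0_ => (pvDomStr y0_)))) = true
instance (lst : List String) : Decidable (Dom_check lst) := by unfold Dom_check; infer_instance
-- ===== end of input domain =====

-- B replaces A's per-character w/b run counters with a groupby-style pass over maximal run
-- lengths (each must be ≤ 2); idiomatic decomposition, same cost, proved equal on all inputs.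


-- ===== PORT A =====
-- inner loop of A: state (w, b) = current run counters, early False when either exceeds 2
def checkRowA : List Char → Int → Int → Bool
  | [], _, _ => true
  | c :: rest, w, b =>
    let w' : Int := if c == 'W' then w + 1 else 0
    let b' : Int := if c == 'W' then 0 else b + 1
    if w' > 2 || b' > 2 then false else checkRowA rest w' b'

def check (lst : List String) : Bool :=
  lst.all (fun r =>
    (PySem.Str.count r "W" == PySem.Str.count r "B") && checkRowA r.toList 0 0)

-- ===== PORT B =====
-- B's run-length pass: current run has key k (is it 'W'?) and length n; emit n when the key flips
def runGo (k : Bool) (n : Nat) : List Char → List Nat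
  | [] => [n]
  | c :: rest =>
    if (c == 'W') == k then runGo k (n + 1) rest
    else n :: runGo (c == 'W') 1 rest

def runLengths : List Char → List Nat
  | [] => []
  | c :: rest => runGo (c == 'W') 1 rest

def check_alt (lst : List String) : Bool :=
  lst.all (fun r =>
    (PySem.Str.count r "W" == PySem.Str.count r "B")
      && (runLengths r.toList).all (fun n => n ≤ 2))

-- ===== PRECONDITION & SPEC =====
def Spec_check (lst : List String) (out : Bool) : Prop := out = check_alt lst
instance (lst : List String) (out : Bool) : Decidable (Spec_check lst out) := by unfold Spec_check; infer_instance

-- ===== CLAIM (what is proved, stated in full; the proofs are below) =====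
def Claim_equal_check : Prop := ∀ (lst : List String), Dom_check lst → Spec_check lst (check lst)

-- ===== LEMMAS AND PROOFS =====

theorem runGo_all_false (rest : List Char) (k : Bool) (n : Nat) (h : 3 ≤ n) :
    (runGo k n rest).all (fun m => m ≤ 2) = false := by
  induction rest generalizing k n with
  | nil =>
    simp only [runGo, List.all_cons, List.all_nil, Bool.and_true]
    rw [decide_eq_false_iff_not]
    omega
  | cons c rest ih =>
    rw [runGo]
    by_cases hc : ((c == 'W') == k) = true
    · rw [if_pos hc]
      exact ih k (n + 1) (by omega)
    · rw [if_neg hc, List.all_cons]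
      have hd : decide (n ≤ 2) = false := by
        rw [decide_eq_false_iff_not]; omega
      rw [hd, Bool.false_and]

theorem rowA_eq_runGo (rest : List Char) (k : Bool) (n : Nat)
    (h1 : 1 ≤ n) (h2 : n ≤ 2) :
    checkRowA rest (cond k (n : Int) 0) (cond k 0 (n : Int))
      = (runGo k n rest).all (fun m => m ≤ 2) := by
  induction rest generalizing k n with
  | nil =>
    simp only [checkRowA, runGo, List.all_cons, List.all_nil, Bool.and_true]
    simp [h2]
  | cons c rest ih =>
    interval_cases n
    · cases k with
      | true =>
        cases hk : (c == 'W') with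
        | true =>
          have h := ih true 2 (by norm_num) (by norm_num)
          simp only [cond_true, Nat.cast_ofNat, Nat.cast_one] at h
          simp [checkRowA, runGo, hk, h]
        | false =>
          have h := ih false 1 (by norm_num) (by norm_num)
          simp only [cond_false, Nat.cast_ofNat, Nat.cast_one] at h
          simp [checkRowA, runGo, hk, h]
      | false =>
        cases hk : (c == 'W') with
        | true =>
          have h := ih true 1 (by norm_num) (by norm_num)
          simp only [cond_true, Nat.cast_ofNat, Nat.cast_one] at h
          simp [checkRowA, runGo, hk, h]
        | false =>
          have h := ih false 2 (by norm_num) (by norm_num)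
          simp only [cond_false, Nat.cast_ofNat, Nat.cast_one] at h
          simp [checkRowA, runGo, hk, h]
    · cases k with
      | true =>
        cases hk : (c == 'W') with
        | true =>
          have h := runGo_all_false rest true 3 (by norm_num)
          simp [checkRowA, runGo, hk, h]
        | false =>
          have h := ih false 1 (by norm_num) (by norm_num)
          simp only [cond_false, Nat.cast_ofNat, Nat.cast_one] at h
          simp [checkRowA, runGo, hk, h]
      | false =>
        cases hk : (c == 'W') with
        | true =>
          have h := ih true 1 (by norm_num) (by norm_num)
          simp only [cond_true, Nat.cast_ofNat, Nat.cast_one] at h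
          simp [checkRowA, runGo, hk, h]
        | false =>
          have h := runGo_all_false rest false 3 (by norm_num)
          simp [checkRowA, runGo, hk, h]

theorem rowA_eq_runLengths (cs : List Char) :
    checkRowA cs 0 0 = (runLengths cs).all (fun m => m ≤ 2) := by
  cases cs with
  | nil => simp [checkRowA, runLengths]
  | cons c rest =>
    cases hk : (c == 'W') with
    | true =>
      have h := rowA_eq_runGo rest true 1 (by norm_num) (by norm_num)
      simp only [cond_true, Nat.cast_one] at h
      simp [checkRowA, runLengths, hk, h]
    | false =>
      have h := rowA_eq_runGo rest false 1 (by norm_num) (by norm_num)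
      simp only [cond_false, Nat.cast_one] at h
      simp [checkRowA, runLengths, hk, h]

-- ===== VERDICT (by name: the statement is the Claim_ definition above) =====
theorem check_spec : Claim_equal_check := by
  intro lst _
  unfold Spec_check check check_alt
  congr 1
  funext r
  rw [rowA_eq_runLengths]
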